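-- pv_equiv track=rewrite | github.com/ASSERT-KTH/Mokav | experiments/pynguin/c4b/single-return/generated_tests/src_922/1/src_922.py | func
-- ===== SOURCE A (Python) =====
-- def func(*args):
--
-- 	import sys
--
-- 	def prime(n):
-- 	    for i in range(2, n):
-- 	        if ((i * i) > n):
-- 	            break
-- 	        if (divmod(n, i)[1] == 0):
-- 	            return False
-- 	    if (n > 1):
-- 	        return True
-- 	    else:
-- 	        return False
--
-- 	def solve(n):
-- 	    ans = 0
-- 	    cnt = [0 for i in range((n + 1))]
-- 	    for i in range(2, (n + 1)):
-- 	        if prime(i):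
-- 	            for j in range(i, (n + 1), i):
-- 	                cnt[j] += 1
-- 	    for i in range((n + 1)):
-- 	        if (cnt[i] == 2):
-- 	            ans += 1
-- 	    return ans
-- 	n = int(args[0])
-- 	return(solve(n))
-- ===== SOURCE B (Python) =====
-- def func(*args):
--     n = int(args[0])
--     size = n + 1
--     cnt = [0] * size
--     for i in range(2, size):
--         if cnt[i] == 0:  # i has no smaller prime factor, so i is prime
--             for j in range(i, size, i):
--                 cnt[j] += 1
--     return sum(1 for v in cnt if v == 2)
-- ===== Notes on version B (the rewrite author's own statement) =====
-- stated objective: faster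
-- what changed: Replaces the per-number trial-division primality test with a pure Sieve of Eratosthenes (a number is prime when its distinct-prime-factor count is still 0 when reached) and counts the final answer by scanning the values directly.
import Mathlib
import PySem

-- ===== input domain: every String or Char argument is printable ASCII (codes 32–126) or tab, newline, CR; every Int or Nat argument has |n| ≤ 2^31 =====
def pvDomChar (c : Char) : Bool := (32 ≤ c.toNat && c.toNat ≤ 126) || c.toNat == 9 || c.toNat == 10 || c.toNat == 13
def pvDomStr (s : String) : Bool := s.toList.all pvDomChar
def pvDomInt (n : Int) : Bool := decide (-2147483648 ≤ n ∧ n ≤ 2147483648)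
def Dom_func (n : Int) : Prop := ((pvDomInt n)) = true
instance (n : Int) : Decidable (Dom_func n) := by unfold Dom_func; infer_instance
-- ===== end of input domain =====

-- B replaces A's per-number trial-division primality test with a pure sieve
-- (prime ⟺ distinct-prime-factor count still 0) and scans values for the final count: faster.

-- ===== PORT A =====
-- A's nested 'prime': for i in range(2, n): break if i*i > n; return False if n % i == 0; then return n > 1
def primeLoopA (m : Int) : List Int → Bool
  | [] => decide (m > 1)
  | i :: rest =>
      if i * i > m then decide (m > 1)
      else if PySem.Int.mod m i == 0 then false
      else primeLoopA m rest

def primeA (m : Int) : Bool := primeLoopA m (PySem.List.pyRange 2 m 1)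

-- 'for j in range(i, n + 1, i): cnt[j] += 1'
def innerA (n : Int) (c : List Int) (i : Int) : List Int :=
  (PySem.List.pyRange i (n + 1) i).foldl
    (fun c2 j => PySem.List.pySetD c2 j (PySem.List.pyGetD c2 j 0 + 1)) c

def func (n : Int) : Int :=
  let cnt0 : List Int := (PySem.List.pyRange 0 (n + 1) 1).map (fun _ => 0)
  let cnt := (PySem.List.pyRange 2 (n + 1) 1).foldl
    (fun c i => if primeA i then innerA n c i else c) cnt0
  (PySem.List.pyRange 0 (n + 1) 1).foldl
    (fun a i => if PySem.List.pyGetD cnt i 0 == 2 then a + 1 else a) 0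

-- ===== PORT B =====
-- 'for j in range(i, size, i): cnt[j] += 1'
def innerB (size : Int) (c : List Int) (i : Int) : List Int :=
  (PySem.List.pyRange i size i).foldl
    (fun c2 j => PySem.List.pySetD c2 j (PySem.List.pyGetD c2 j 0 + 1)) c

def func_alt (n : Int) : Int :=
  let size := n + 1
  let cnt := (PySem.List.pyRange 2 size 1).foldl
    (fun c i => if PySem.List.pyGetD c i 0 == 0 then innerB size c i else c)
    (List.replicate size.toNat 0)
  cnt.foldl (fun a v => if v == 2 then a + 1 else a) 0

-- ===== PRECONDITION & SPEC =====
def Spec_func (n : Int) (out : Int) : Prop := out = func_alt n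
instance (n : Int) (out : Int) : Decidable (Spec_func n out) := by unfold Spec_func; infer_instance

-- ===== CLAIM (what is proved, stated in full; the proofs are below) =====
def Claim_equal_func : Prop := ∀ (n : Int), Dom_func n → Spec_func n (func n)

-- ===== LEMMAS AND PROOFS =====

-- model of the sieve state after processing the primes in [2, b):
-- cnt[j] = number of primes p with 2 ≤ p < b, p ≤ j and p ∣ j
def pcount (b j : Int) : Int :=
  (((PySem.List.pyRange 2 b 1).filter
      (fun p => primeA p && decide (p ≤ j) && (PySem.Int.mod j p == 0))).length : Int)

def model (n b : Int) : List Int :=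
  (PySem.List.pyRange 0 (n + 1) 1).map (fun j => pcount b j)

lemma length_model (n b : Int) : (model n b).length = (n + 1).toNat := by
  simp [model, PySem.List.length_pyRange_one]

lemma getD_model (n b : Int) (k : Nat) (hk : k < (n + 1).toNat) :
    (model n b).getD k 0 = pcount b (k : Int) := by
  rw [List.getD_eq_getElem _ _ (by simpa [length_model] using hk)]
  unfold model
  rw [List.getElem_map, PySem.List.getElem_pyRange_one]
  norm_num

lemma pyGetD_nonneg {xs : List Int} {j : Int} (h : 0 ≤ j) (d : Int) :
    PySem.List.pyGetD xs j d = xs.getD j.toNat d := by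
  obtain ⟨m, rfl⟩ := Int.eq_ofNat_of_zero_le h
  simp

lemma model_le_two (n b : Int) (hb : b ≤ 2) :
    model n b = List.replicate (n + 1).toNat 0 := by
  simp [model, pcount, PySem.List.pyRange_one_eq_nil hb, List.map_const',
    PySem.List.length_pyRange_one]

lemma length_foldl_incr (M : List Int) : ∀ (c : List Int),
    (M.foldl (fun c2 j => PySem.List.pySetD c2 j (PySem.List.pyGetD c2 j 0 + 1)) c).length
      = c.length := by
  induction M with
  | nil => intro c; simp
  | cons j M ih =>
      intro c
      rw [List.foldl_cons, ih, PySem.List.length_pySetD]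

-- the generic increment loop: each in-range index occurring in the (nodup) list M gains 1
lemma foldl_incr (M : List Int) :
    ∀ (c : List Int), M.Nodup → (∀ j ∈ M, 0 ≤ j ∧ j.toNat < c.length) →
    ∀ (k : Nat), k < c.length →
      (M.foldl (fun c2 j => PySem.List.pySetD c2 j (PySem.List.pyGetD c2 j 0 + 1)) c).getD k 0
        = c.getD k 0 + (if (k : Int) ∈ M then 1 else 0) := by
  induction M with
  | nil => intro c _ _ k _; simp
  | cons j M ih =>
      intro c hnd hin k hk
      obtain ⟨hj0, hjlen⟩ := hin j (List.mem_cons_self)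
      have hset : PySem.List.pySetD c j (PySem.List.pyGetD c j 0 + 1)
          = c.set j.toNat (PySem.List.pyGetD c j 0 + 1) :=
        PySem.List.pySetD_of_nonneg c _ hj0
      have hlen' : (c.set j.toNat (PySem.List.pyGetD c j 0 + 1)).length = c.length := by simp
      rw [List.foldl_cons, hset,
        ih _ hnd.of_cons (fun x hx => by simpa [hlen'] using hin x (List.mem_cons_of_mem _ hx))
          k (by simpa [hlen'] using hk)]
      by_cases hkj : (k : Int) = j
      · have hkj' : j.toNat = k := by omega
        have hknM : (k : Int) ∉ M := by rw [hkj]; exact (List.nodup_cons.mp hnd).1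
        have : (c.set j.toNat (PySem.List.pyGetD c j 0 + 1)).getD k 0
            = PySem.List.pyGetD c j 0 + 1 := by
          rw [List.getD_eq_getElem _ _ (by simpa [hlen'] using hk)]
          simp [hkj']
        rw [this, pyGetD_nonneg hj0, hkj']
        have hjM : j ∉ M := (List.nodup_cons.mp hnd).1
        simp [hkj, hjM]
      · have hkj' : j.toNat ≠ k := by omega
        have : (c.set j.toNat (PySem.List.pyGetD c j 0 + 1)).getD k 0 = c.getD k 0 := by
          rw [List.getD_eq_getElem _ _ (by simpa [hlen'] using hk),
            List.getD_eq_getElem _ _ hk]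
          simp [hkj']
        rw [this]
        simp [List.mem_cons, hkj]

lemma nodup_pyRange_pos (a b s : Int) (hs : 0 < s) :
    (PySem.List.pyRange a b s).Nodup := by
  rw [PySem.List.pyRange_of_pos a b hs]
  refine List.Nodup.map ?_ (List.nodup_range)
  intro x y h
  have : s * (x : Int) = s * (y : Int) := by linarith
  have := mul_left_cancel₀ (by omega : s ≠ 0) this
  exact_mod_cast this

lemma mem_multiples (b n : Int) (hb : 0 < b) (x : Int) :
    x ∈ PySem.List.pyRange b (n + 1) b ↔ b ≤ x ∧ x < n + 1 ∧ b ∣ x := by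
  rw [PySem.List.mem_pyRange_iff_of_pos hb]
  constructor
  · rintro ⟨h1, h2, h3⟩
    exact ⟨h1, h2, by have := h3.add (dvd_refl b); simpa using this⟩
  · rintro ⟨h1, h2, h3⟩
    exact ⟨h1, h2, h3.sub (dvd_refl b)⟩

-- pcount one step: processing i = b adds 1 exactly to the multiples of b (≥ b) when b is prime
lemma pcount_succ (b j : Int) (hb : 2 ≤ b) :
    pcount (b + 1) j = pcount b j
      + (if primeA b && decide (b ≤ j) && (PySem.Int.mod j b == 0) then 1 else 0) := by
  unfold pcount
  rw [PySem.List.pyRange_one_succ_right (by omega : (2:Int) ≤ b), List.filter_append,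
    List.length_append]
  by_cases h : (primeA b && decide (b ≤ j) && (PySem.Int.mod j b == 0)) = true
  · simp [h]
  · simp [h]

-- trial-division loop characterisation
lemma primeLoopA_iff (m : Int) (hm : 2 ≤ m) :
    ∀ (t : Nat) (a : Int), 2 ≤ a → (m - a).toNat = t →
      (primeLoopA m (PySem.List.pyRange a m 1) = true
        ↔ ∀ i : Int, a ≤ i → i * i ≤ m → ¬ i ∣ m) := by
  intro t
  induction t with
  | zero =>
      intro a ha ht
      have hma : m ≤ a := by omega
      rw [PySem.List.pyRange_one_eq_nil hma]
      simp only [primeLoopA, decide_eq_true_eq]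
      constructor
      · intro _ i hi hii _
        nlinarith
      · intro _; omega
  | succ t ih =>
      intro a ha ht
      have ham : a < m := by omega
      rw [PySem.List.pyRange_one_cons ham]
      simp only [primeLoopA]
      by_cases hbreak : a * a > m
      · simp only [if_pos hbreak, decide_eq_true_eq]
        constructor
        · intro _ i hi hii _
          nlinarith
        · intro _; omega
      · rw [if_neg hbreak]
        by_cases hdvd : a ∣ m
        · have : PySem.Int.mod m a == 0 := by
            simp [(PySem.Int.mod_eq_zero_iff_dvd m a).mpr hdvd]
          rw [if_pos this]
          constructor
          · intro h; exact absurd h (by simp)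
          · intro h; exact absurd hdvd (h a le_rfl (by omega))
        · have : ¬ (PySem.Int.mod m a == 0) = true := by
            simpa [PySem.Int.mod_eq_zero_iff_dvd m a] using hdvd
          rw [if_neg this, ih (a + 1) (by omega) (by omega)]
          constructor
          · intro h i hi hii
            rcases eq_or_lt_of_le hi with rfl | hlt
            · exact hdvd
            · exact h i (by omega) hii
          · intro h i hi hii
            exact h i (by omega) hii

lemma primeA_iff (m : Int) (hm : 2 ≤ m) : primeA m = true ↔ Nat.Prime m.toNat := by
  rw [primeA, primeLoopA_iff m hm (m - 2).toNat 2 le_rfl rfl, Nat.prime_def_le_sqrt]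
  constructor
  · intro h
    refine ⟨by omega, fun q hq hqs hdvd => ?_⟩
    have hq2 : (2 : Int) ≤ (q : Int) := by exact_mod_cast hq
    have hqq : (q : Int) * (q : Int) ≤ m := by
      have h1 : q * q ≤ m.toNat := Nat.le_sqrt.mp hqs
      have : ((q * q : Nat) : Int) ≤ ((m.toNat : Nat) : Int) := by exact_mod_cast h1
      simpa [Int.toNat_of_nonneg (by omega : (0:Int) ≤ m)] using this
    refine h (q : Int) hq2 hqq ?_
    have : ((q : Int)) ∣ ((m.toNat : Nat) : Int) := Int.natCast_dvd_natCast.mpr hdvd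
    simpa [Int.toNat_of_nonneg (by omega : (0:Int) ≤ m)] using this
  · rintro ⟨_, h⟩ i hi hii hdvd
    have hi0 : 0 ≤ i := by omega
    have hiq : (2 : Nat) ≤ i.toNat := by omega
    have hsq : i.toNat ≤ m.toNat.sqrt := by
      rw [Nat.le_sqrt]
      have : (((i.toNat * i.toNat : Nat)) : Int) ≤ ((m.toNat : Nat) : Int) := by
        push_cast
        rw [Int.toNat_of_nonneg hi0, Int.toNat_of_nonneg (by omega : (0:Int) ≤ m)]
        exact hii
      exact_mod_cast this
    refine h i.toNat hiq hsq ?_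
    have : ((i.toNat : Nat) : Int) ∣ ((m.toNat : Nat) : Int) := by
      rw [Int.toNat_of_nonneg hi0, Int.toNat_of_nonneg (by omega : (0:Int) ≤ m)]
      exact hdvd
    exact_mod_cast this

-- B's guard: the model count at b is 0 iff b is prime (for 2 ≤ b)
lemma pcount_self_eq_zero_iff (b : Int) (hb : 2 ≤ b) :
    pcount b b = 0 ↔ primeA b = true := by
  have hfilter : pcount b b = 0 ↔
      ∀ p ∈ PySem.List.pyRange 2 b 1,
        ¬ (primeA p && decide (p ≤ b) && (PySem.Int.mod b p == 0)) = true := by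
    unfold pcount
    rw [Nat.cast_eq_zero, List.length_eq_zero_iff, List.filter_eq_nil_iff]
  rw [hfilter, primeA_iff b hb]
  constructor
  · intro h
    by_contra hnp
    have hb1 : b.toNat ≠ 1 := by omega
    have hqp : Nat.Prime b.toNat.minFac := Nat.minFac_prime hb1
    have hqd : b.toNat.minFac ∣ b.toNat := Nat.minFac_dvd b.toNat
    have hqlt : b.toNat.minFac < b.toNat := by
      rcases lt_or_eq_of_le (Nat.le_of_dvd (by omega) hqd) with h' | h'
      · exact h'
      · exact absurd (Nat.prime_def_minFac.mpr ⟨by omega, h'⟩) hnp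
    have hq2 : 2 ≤ b.toNat.minFac := hqp.two_le
    refine h ((b.toNat.minFac : Nat) : Int) ?_ ?_
    · rw [PySem.List.mem_pyRange_one]
      constructor
      · exact_mod_cast hq2
      · omega
    · have h1 : primeA ((b.toNat.minFac : Nat) : Int) = true := by
        rw [primeA_iff _ (by exact_mod_cast hq2)]
        simpa using hqp
      have h2 : ((b.toNat.minFac : Nat) : Int) ∣ b := by
        have : ((b.toNat.minFac : Nat) : Int) ∣ ((b.toNat : Nat) : Int) :=
          Int.natCast_dvd_natCast.mpr hqd
        simpa [Int.toNat_of_nonneg (by omega : (0:Int) ≤ b)] using this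
      simp [h1, (PySem.Int.mod_eq_zero_iff_dvd b _).mpr h2]
      omega
  · intro hp p hpmem hcond
    rw [PySem.List.mem_pyRange_one] at hpmem
    obtain ⟨hp2, hpb⟩ := hpmem
    simp only [Bool.and_eq_true, beq_iff_eq, decide_eq_true_eq] at hcond
    obtain ⟨⟨hpp, _⟩, hmod⟩ := hcond
    have hdvd : p ∣ b := (PySem.Int.mod_eq_zero_iff_dvd b p).mp hmod
    have hdvdN : p.toNat ∣ b.toNat := by
      have : ((p.toNat : Nat) : Int) ∣ ((b.toNat : Nat) : Int) := by
        rw [Int.toNat_of_nonneg (by omega : (0:Int) ≤ p),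
          Int.toNat_of_nonneg (by omega : (0:Int) ≤ b)]
        exact hdvd
      exact_mod_cast this
    rcases (Nat.Prime.eq_one_or_self_of_dvd hp p.toNat hdvdN) with h1 | h1 <;> omega

-- one sieve step on the model, both guards
lemma model_step (n b : Int) (hb : 2 ≤ b) (hbn : b ≤ n) :
    (if primeA b then innerA n (model n b) b else model n b) = model n (b + 1)
    ∧ (if PySem.List.pyGetD (model n b) b 0 == 0 then innerB (n + 1) (model n b) b
        else model n b) = model n (b + 1) := by
  have hbN : b.toNat < (n + 1).toNat := by omega
  have hguardB : (PySem.List.pyGetD (model n b) b 0 == 0) = primeA b := by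
    rw [pyGetD_nonneg (by omega : (0:Int) ≤ b), getD_model n b b.toNat hbN,
      Int.toNat_of_nonneg (by omega : (0:Int) ≤ b)]
    by_cases hp : primeA b = true
    · simp [hp, (pcount_self_eq_zero_iff b hb).mpr hp]
    · have : ¬ pcount b b = 0 := fun h => hp ((pcount_self_eq_zero_iff b hb).mp h)
      simp [hp, this]
  have hinner : primeA b = true → innerA n (model n b) b = model n (b + 1) := by
    intro hp
    have hnodup : (PySem.List.pyRange b (n + 1) b).Nodup :=
      nodup_pyRange_pos b (n + 1) b (by omega)
    have hmem : ∀ j ∈ PySem.List.pyRange b (n + 1) b, 0 ≤ j ∧ j.toNat < (model n b).length := by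
      intro j hj
      rw [mem_multiples b n (by omega)] at hj
      constructor
      · omega
      · rw [length_model]; omega
    have hlen : (innerA n (model n b) b).length = (n + 1).toNat := by
      unfold innerA
      rw [length_foldl_incr, length_model]
    apply List.ext_getElem (by rw [hlen, length_model])
    intro k h1 h2
    rw [← List.getD_eq_getElem _ 0 h1, ← List.getD_eq_getElem _ 0 h2]
    have hkN : k < (n + 1).toNat := by rwa [hlen] at h1
    unfold innerA
    rw [foldl_incr _ _ hnodup hmem k (by rw [length_model]; exact hkN),
      getD_model n b k hkN, getD_model n (b + 1) k hkN, pcount_succ b _ hb]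
    have hklt : (k : Int) < n + 1 := by omega
    have hmemk : ((k : Int) ∈ PySem.List.pyRange b (n + 1) b) ↔ (b ≤ (k : Int) ∧ b ∣ (k : Int)) := by
      rw [mem_multiples b n (by omega)]
      exact ⟨fun ⟨x, _, z⟩ => ⟨x, z⟩, fun ⟨x, z⟩ => ⟨x, hklt, z⟩⟩
    simp only [hmemk]
    by_cases hble : b ≤ (k : Int)
    · by_cases hdv : b ∣ (k : Int)
      · simp [hp, hble, hdv, (PySem.Int.mod_eq_zero_iff_dvd (k : Int) b).mpr hdv]
      · have : ¬ (PySem.Int.mod (k : Int) b == 0) = true := by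
          simpa [PySem.Int.mod_eq_zero_iff_dvd (k : Int) b] using hdv
        simp [hp, hble, hdv, this]
    · simp [hble]
  have hnp : primeA b = false → model n (b + 1) = model n b := by
    intro hp
    unfold model
    refine List.map_congr_left (fun k hk => ?_)
    rw [pcount_succ b _ hb]
    simp [hp]
  constructor
  · by_cases hp : primeA b = true
    · rw [if_pos hp, hinner hp]
    · rw [if_neg hp, hnp (by simpa using hp)]
  · rw [hguardB]
    by_cases hp : primeA b = true
    · rw [if_pos hp, ← hinner hp]
      unfold innerA innerB
      rfl
    · rw [if_neg hp, hnp (by simpa using hp)]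

-- the two sieve folds both compute the model
lemma states (n : Int) (t : Nat) :
    ∀ b : Int, b ≤ n + 1 → (b - 2).toNat = t →
      ((PySem.List.pyRange 2 b 1).foldl
          (fun c i => if primeA i then innerA n c i else c)
          ((PySem.List.pyRange 0 (n + 1) 1).map (fun _ => 0)) = model n b)
      ∧ ((PySem.List.pyRange 2 b 1).foldl
          (fun c i => if PySem.List.pyGetD c i 0 == 0 then innerB (n + 1) c i else c)
          (List.replicate (n + 1).toNat 0) = model n b) := by
  induction t with
  | zero =>
      intro b hbn ht
      have hb2 : b ≤ 2 := by omega
      rw [PySem.List.pyRange_one_eq_nil hb2, model_le_two n b hb2]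
      refine ⟨?_, by simp⟩
      simp only [List.foldl_nil, List.map_const']
      simp [PySem.List.length_pyRange_one]
  | succ t ih =>
      intro b hbn ht
      have hb2 : 2 ≤ b - 1 := by omega
      have hsplit : PySem.List.pyRange 2 b 1
          = PySem.List.pyRange 2 (b - 1) 1 ++ [b - 1] := by
        have := PySem.List.pyRange_one_succ_right (a := 2) (b := b - 1) (by omega)
        simpa [sub_add_cancel] using this
      obtain ⟨ihA, ihB⟩ := ih (b - 1) (by omega) (by omega)
      obtain ⟨hstepA, hstepB⟩ := model_step n (b - 1) hb2 (by omega)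
      constructor
      · rw [hsplit, List.foldl_append, ihA]
        simpa [sub_add_cancel] using hstepA
      · rw [hsplit, List.foldl_append, ihB]
        simpa [sub_add_cancel] using hstepB

-- ===== VERDICT (by name: the statement is the Claim_ definition above) =====
theorem func_spec : Claim_equal_func := by
  intro n _
  unfold Spec_func
  simp only [func, func_alt]
  obtain ⟨hA, hB⟩ := states n (n + 1 - 2).toNat (n + 1) le_rfl rfl
  rw [hA, hB]
  by_cases hn : 0 ≤ n + 1
  · have hlen : ((model n (n + 1)).length : Int) = n + 1 := by
      rw [length_model]; omega
    have h := PySem.List.foldl_pyRange_zero_pyGetD' (model n (n + 1)) 0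
      (fun (a : Int) v => if v == 2 then a + 1 else a) (0 : Int)
    rw [hlen] at h
    exact h
  · have hmnil : model n (n + 1) = [] := by
      unfold model
      rw [PySem.List.pyRange_one_eq_nil (by omega : (n + 1 : Int) ≤ 0)]
      simp
    rw [hmnil, PySem.List.pyRange_one_eq_nil (by omega : (n + 1 : Int) ≤ 0)]
    simp
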